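-- pv_equiv track=rewrite | github.com/rebuilder945/FL_research | ast_research/python_code_5.23/page4/success_code/王家峻-3214-2023-10-24_20_40_00.py | yi
-- ===== SOURCE A (Python) =====
-- def yi(b):
--     t=[i for i,x in enumerate(b) if x==0]
--     l=[ i for i, x in enumerate(b) if x !=0]
--     if l == []:
--         return b
--     else:
--         for i in reversed(t):
--             b.insert(l[-1], b.pop(i))
--     return b
-- ===== SOURCE B (Python) =====
-- def yi(b):
--     # Move the zeros of b to the end, keeping the nonzeros in order (one filter pass).
--     # (Returns a fresh list; it does not mutate b.)
--     nz = [x for x in b if x != 0]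
--     return nz + [0] * (len(b) - len(nz))
-- ===== Notes on version B (the rewrite author's own statement) =====
-- stated objective: simpler
-- what changed: B replaces A's replay of pop/insert list operations by a single filter pass that puts the nonzeros first and appends the zeros.
-- intended difference: On lists whose last nonzero element is followed by s >= 1 zeros (except counts s with s+2 a power of two, where the drift cancels), A's stale insert index (the position the last nonzero had before the pops) leaves that element buried among the zeros; B returns the nonzeros in order followed by all zeros, the evident intent of moving zeros to the end. — e.g. on yi([1, 0]): A returns [0, 1], B returns [1, 0]
import Mathlib
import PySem

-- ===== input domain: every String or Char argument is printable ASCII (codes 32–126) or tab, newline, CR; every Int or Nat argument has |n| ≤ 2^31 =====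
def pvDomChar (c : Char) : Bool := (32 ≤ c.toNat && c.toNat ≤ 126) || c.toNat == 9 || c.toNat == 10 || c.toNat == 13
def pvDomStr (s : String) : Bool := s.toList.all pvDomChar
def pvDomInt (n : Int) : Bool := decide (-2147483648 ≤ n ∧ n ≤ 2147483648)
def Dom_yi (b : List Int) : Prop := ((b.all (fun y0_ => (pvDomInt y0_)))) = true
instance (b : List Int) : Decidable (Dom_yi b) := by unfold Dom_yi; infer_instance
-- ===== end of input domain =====

-- B moves the zeros to the end in one filter pass instead of A's pop/insert replay
-- (the claim is about the RETURN value only: Python A mutates its argument in place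
-- and returns it, B returns a fresh list).

-- ===== PORT A =====
-- one loop body step: b.insert(l[-1], b.pop(i))
def yiStep (l : List Int) (cur : List Int) (i : Int) : List Int :=
  match PySem.List.pop? cur i with
  | none => cur            -- unreachable: Python would raise IndexError
  | some (v, rest) =>
    match PySem.List.pyGet? l (-1) with
    | none => cur          -- unreachable: l ≠ [] in the branch that loops
    | some k => PySem.List.insert rest k v

def yi (b : List Int) : List Int :=
  let t : List Int := ((PySem.List.enumerate b).filter (fun p => p.2 == 0)).map (·.1)
  let l : List Int := ((PySem.List.enumerate b).filter (fun p => p.2 != 0)).map (·.1)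
  if l = [] then b
  else t.reverse.foldl (yiStep l) b

-- ===== PORT B =====
def yi_alt (b : List Int) : List Int :=
  let nz := b.filter (fun x => x ≠ 0)
  nz ++ List.replicate (b.length - nz.length) 0

-- ===== PRECONDITION & SPEC =====
-- On lists whose last nonzero element (at index m) is followed by s ≥ 1 zeros (except
-- counts s with s+2 a power of two, where the drift cancels), A's stale insert index
-- (the position the last nonzero had before the pops) leaves that element buried among
-- the zeros; B returns the nonzeros in order followed by all zeros, the evident
-- intent of moving zeros to the end.
def D_yi (b : List Int) : Prop :=
  ∃ m < b.length, b[m]? ≠ some 0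
    ∧ (∀ j < b.length, m < j → b[j]? = some 0)
    ∧ 1 ≤ b.length - 1 - m
    ∧ ∀ k ≤ b.length + 1, b.length - 1 - m + 2 ≠ 2 ^ k
instance (b : List Int) : Decidable (D_yi b) := by unfold D_yi; infer_instance

def Spec_yi (b : List Int) (out : List Int) : Prop := ¬ D_yi b → out = yi_alt b
instance (b : List Int) (out : List Int) : Decidable (Spec_yi b out) := by unfold Spec_yi; infer_instance

def pvDiffWitness_yi : List Int := [1, 0]
def pvDiffWitnessOut_yi : (List Int) × (List Int) := ([0, 1], [1, 0])

-- ===== CLAIM (what is proved, stated in full; the proofs are below) =====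
def Claim_unchanged_yi : Prop := ∀ (b : List Int), Dom_yi b → Spec_yi b (yi b)
def Claim_changed_yi : Prop := Dom_yi (pvDiffWitness_yi) ∧ D_yi (pvDiffWitness_yi) ∧ yi (pvDiffWitness_yi) = pvDiffWitnessOut_yi.1 ∧ yi_alt (pvDiffWitness_yi) = pvDiffWitnessOut_yi.2 ∧ pvDiffWitnessOut_yi.1 ≠ pvDiffWitnessOut_yi.2
def Claim_exact_yi : Prop := ∀ (b : List Int), Dom_yi b → D_yi b → yi b ≠ yi_alt b

-- ===== LEMMAS AND PROOFS =====

-- abbreviation used throughout: a block of zeros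
def repZ (n : Nat) : List Int := List.replicate n (0 : Int)

-- B's last-nonzero decomposition (proof-side only)
def yiLastNZ : List Int → Option (Nat × Int)
  | [] => none
  | x :: xs =>
    match yiLastNZ xs with
    | some (k, v) => some (k + 1, v)
    | none => if x ≠ 0 then some (0, x) else none

-- final count of zeros directly left of b[m] after A's first phase (proof-side only)
def yiF (s : Nat) : Nat :=
  if s = 0 then 0
  else if s % 2 = 1 then (s + 1) / 2
  else yiF (s / 2 - 1)
termination_by s
decreasing_by omega

-- positions (from the left, starting at c) of the zeros of a list
def zPosFrom (c : Nat) : List Int → List Nat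
  | [] => []
  | x :: xs => if x = 0 then c :: zPosFrom (c + 1) xs else zPosFrom (c + 1) xs

-- ascending/descending runs of consecutive naturals
def ascN (c : Nat) : Nat → List Nat
  | 0 => []
  | s + 1 => c :: ascN (c + 1) s

def descN (c : Nat) : Nat → List Nat
  | 0 => []
  | s + 1 => (c + s) :: descN c s

-- the A-side loop body once the insert position is known to be (m : Int)
def stepN (m : Nat) (cur : List Int) (i : Nat) : List Int :=
  match PySem.List.pop? cur (i : Int) with
  | none => cur
  | some (v, rest) => PySem.List.insert rest (m : Int) v

-- count of zeros left of x after A's first phase, as a recursion on the op index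
def phJ : Nat → Nat → Nat → Nat
  | 0, j, _ => j
  | q + 1, j, r =>
    if q + 1 < j then phJ q j r
    else if q + 1 = j then phJ q 0 (j + r)
    else phJ q (j + 1) (r - 1)


-- ---- arithmetic facts about phJ ----

lemma phJ_succ (q j r : Nat) : phJ (q + 1) j r =
    if q + 1 < j then phJ q j r
    else if q + 1 = j then phJ q 0 (j + r)
    else phJ q (j + 1) (r - 1) := rfl

lemma phJ_small : ∀ (qc j r : Nat), qc < j → phJ qc j r = j := by
  intro qc
  induction qc with
  | zero => intro j r _; rfl
  | succ q ih =>
    intro j r h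
    rw [phJ_succ, if_pos h]
    exact ih j r (by omega)

lemma phJ_diag_odd : ∀ (e j r : Nat), 2 * e + 1 ≤ r → phJ (j + 2 * e + 1) j r = j + e + 1 := by
  intro e
  induction e with
  | zero =>
    intro j r _
    have h1 : j + 2 * 0 + 1 = j + 1 := by omega
    rw [h1, phJ_succ, if_neg (by omega), if_neg (by omega)]
    rw [phJ_small j (j + 1) (r - 1) (by omega)]
  | succ e ih =>
    intro j r h
    have h1 : j + 2 * (e + 1) + 1 = ((j + 1) + 2 * e + 1) + 1 := by omega
    rw [h1, phJ_succ, if_neg (by omega), if_neg (by omega)]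
    rw [ih (j + 1) (r - 1) (by omega)]
    omega

lemma phJ_diag_even : ∀ (e j r : Nat), 2 * e ≤ r →
    phJ (j + 2 * e) j r = if j + e = 0 then 0 else phJ (j + e - 1) 0 (j + r) := by
  intro e
  induction e with
  | zero =>
    intro j r _
    cases j with
    | zero => rfl
    | succ j' =>
      have h1 : j' + 1 + 2 * 0 = j' + 1 := by omega
      rw [h1, phJ_succ, if_neg (by omega), if_pos rfl, if_neg (by omega)]
      congr 1
  | succ e ih =>
    intro j r h
    have h1 : j + 2 * (e + 1) = ((j + 1) + 2 * e) + 1 := by omega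
    rw [h1, phJ_succ, if_neg (by omega), if_neg (by omega)]
    rw [ih (j + 1) (r - 1) (by omega)]
    rw [if_neg (by omega), if_neg (by omega)]
    have h3 : j + 1 + e - 1 = j + (e + 1) - 1 := by omega
    have h4 : j + 1 + (r - 1) = j + r := by omega
    rw [h3, h4]

lemma phJ_eq_yiF : ∀ (q r : Nat), q ≤ r → phJ q 0 r = yiF q := by
  intro q
  induction q using Nat.strong_induction_on with
  | _ q ih =>
    intro r hq
    cases Nat.eq_zero_or_pos q with
    | inl h0 => subst h0; rw [yiF]; rfl
    | inr hpos =>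
      rcases Nat.even_or_odd q with he | ho
      · obtain ⟨e, he⟩ := he
        have he1 : e ≥ 1 := by omega
        have h1 : q = 0 + 2 * e := by omega
        rw [h1, phJ_diag_even e 0 r (by omega), if_neg (by omega)]
        have h2 : (0 : Nat) + e - 1 = e - 1 := by omega
        have h3 : (0 : Nat) + r = r := by omega
        rw [h2, h3, ih (e - 1) (by omega) r (by omega)]
        conv_rhs => rw [yiF]
        rw [if_neg (show ¬ (0 + 2 * e = 0) by omega),
            if_neg (show ¬ ((0 + 2 * e) % 2 = 1) by omega)]
        congr 1
        omega
      · obtain ⟨e, he⟩ := ho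
        have h1 : q = 0 + 2 * e + 1 := by omega
        rw [h1, phJ_diag_odd e 0 r (by omega)]
        conv_rhs => rw [yiF]
        rw [if_neg (show ¬ (0 + 2 * e + 1 = 0) by omega),
            if_pos (show (0 + 2 * e + 1) % 2 = 1 by omega)]
        omega

lemma phJ_le : ∀ (q j r : Nat), q ≤ j + r → phJ q j r ≤ j + r := by
  intro q
  induction q with
  | zero => intro j r _; simp [phJ]
  | succ q ih =>
    intro j r h
    rw [phJ_succ]
    split_ifs with h1 h2
    · exact ih j r (by omega)
    · have := ih 0 (j + r) (by omega)
      omega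
    · have := ih (j + 1) (r - 1) (by omega)
      omega

-- ---- the loop body on a decomposed list ----

lemma stepN_concat (P u : List Int) (k : Nat) (hk : k < u.length) :
    stepN P.length (P ++ u) (P.length + k) = P ++ u[k] :: u.eraseIdx k := by
  have hn : P.length + k < (P ++ u).length := by simp; omega
  unfold stepN
  rw [PySem.List.pop?_natCast (P ++ u) (P.length + k) hn]
  have hel : (P ++ u)[P.length + k]'hn = u[k] := by
    rw [List.getElem_append_right (by omega)]
    congr 1
    omega
  have her : (P ++ u).eraseIdx (P.length + k) = P ++ u.eraseIdx k := by
    rw [List.eraseIdx_append_of_length_le (by omega)]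
    congr 2
    omega
  simp only [hel, her]
  rw [PySem.List.insert_natCast _ _ _ (by simp)]
  rw [List.take_left' rfl, List.drop_left' rfl]

-- ---- indexing / erasing inside the block  repZ j ++ x :: repZ r  ----

lemma blockLen (j r : Nat) (x : Int) : (repZ j ++ x :: repZ r).length = j + 1 + r := by
  simp [repZ]; omega

lemma blockElem_left (j r k : Nat) (x : Int) (hk : k < j)
    (h : k < (repZ j ++ x :: repZ r).length) : (repZ j ++ x :: repZ r)[k] = 0 := by
  rw [List.getElem_append_left (by simp [repZ]; omega)]
  simp [repZ]

lemma blockElem_mid (j r k : Nat) (x : Int) (hkj : k = j)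
    (h : k < (repZ j ++ x :: repZ r).length) : (repZ j ++ x :: repZ r)[k] = x := by
  subst hkj
  rw [List.getElem_append_right (by simp [repZ])]
  simp [repZ]

lemma blockElem_right (j r k : Nat) (x : Int) (hj : j < k) (hk : k ≤ j + r)
    (h : k < (repZ j ++ x :: repZ r).length) : (repZ j ++ x :: repZ r)[k] = 0 := by
  rw [List.getElem_append_right (by simp [repZ]; omega)]
  have h1 : k - (repZ j).length = (k - j - 1) + 1 := by simp [repZ]; omega
  simp only [h1, List.getElem_cons_succ]
  simp [repZ]

lemma blockErase_left (j r k : Nat) (x : Int) (hk : k < j) :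
    (repZ j ++ x :: repZ r).eraseIdx k = repZ (j - 1) ++ x :: repZ r := by
  rw [List.eraseIdx_append_of_lt_length (by simp [repZ]; omega)]
  have h2 : (repZ j).eraseIdx k = repZ (j - 1) := by
    simp [repZ, List.eraseIdx_replicate, hk]
  rw [h2]

lemma blockErase_mid (j r k : Nat) (x : Int) (hkj : k = j) :
    (repZ j ++ x :: repZ r).eraseIdx k = repZ (j + r) := by
  subst hkj
  rw [List.eraseIdx_append_of_length_le (by simp [repZ])]
  have h1 : k - (repZ k).length = 0 := by simp [repZ]
  rw [h1]
  simp [repZ, ← List.replicate_add]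

lemma blockErase_right (j r k : Nat) (x : Int) (hj : j < k) (hk : k ≤ j + r) :
    (repZ j ++ x :: repZ r).eraseIdx k = repZ j ++ x :: repZ (r - 1) := by
  rw [List.eraseIdx_append_of_length_le (by simp [repZ]; omega)]
  have h1 : k - (repZ j).length = (k - j - 1) + 1 := by simp [repZ]; omega
  rw [h1, List.eraseIdx_cons_succ]
  have h2 : (repZ r).eraseIdx (k - j - 1) = repZ (r - 1) := by
    simp [repZ, List.eraseIdx_replicate]
    intro hge
    omega
  rw [h2]

-- ---- phase 1: the ops at the trailing-zero indices ----

lemma ph1 (P : List Int) (x : Int) : ∀ (q j r : Nat), q ≤ j + r →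
    (descN (P.length + 1) q).foldl (stepN P.length) (P ++ (repZ j ++ x :: repZ r))
      = P ++ (repZ (phJ q j r) ++ x :: repZ (j + r - phJ q j r)) := by
  intro q
  induction q with
  | zero =>
    intro j r _
    simp [descN, phJ, repZ]
  | succ q ih =>
    intro j r hqr
    have hcons : descN (P.length + 1) (q + 1) = (P.length + 1 + q) :: descN (P.length + 1) q := rfl
    rw [hcons, List.foldl_cons]
    have hidx : P.length + 1 + q = P.length + (q + 1) := by omega
    rw [hidx]
    have hk : q + 1 < (repZ j ++ x :: repZ r).length := by rw [blockLen]; omega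
    rw [stepN_concat P (repZ j ++ x :: repZ r) (q + 1) hk]
    rcases Nat.lt_trichotomy (q + 1) j with hlt | heq | hgt
    · -- pops a zero from the left block: the list is unchanged
      rw [blockElem_left j r (q + 1) x hlt, blockErase_left j r (q + 1) x hlt]
      have hback : (0 : Int) :: (repZ (j - 1) ++ x :: repZ r) = repZ j ++ x :: repZ r := by
        have hj : j = (j - 1) + 1 := by omega
        rw [hj]
        simp [repZ, List.replicate_succ]
      rw [hback, ih j r (by omega), phJ_succ, if_pos hlt]
    · -- pops x itself and re-inserts it at position m
      rw [blockElem_mid j r (q + 1) x heq, blockErase_mid j r (q + 1) x heq]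
      have hback : x :: repZ (j + r) = repZ 0 ++ x :: repZ (j + r) := by simp [repZ]
      rw [hback, ih 0 (j + r) (by omega), phJ_succ, if_neg (by omega), if_pos heq]
      simp
    · -- pops a zero from the right block: it migrates to the left block
      rw [blockElem_right j r (q + 1) x hgt (by omega),
          blockErase_right j r (q + 1) x hgt (by omega)]
      have hback : (0 : Int) :: (repZ j ++ x :: repZ (r - 1)) = repZ (j + 1) ++ x :: repZ (r - 1) := by
        simp [repZ, List.replicate_succ]
      rw [hback, ih (j + 1) (r - 1) (by omega), phJ_succ, if_neg (by omega), if_neg (by omega)]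
      have h5 : j + 1 + (r - 1) = j + r := by omega
      rw [h5]

-- ---- nonzero positions (mirror of zPosFrom) ----

def nzPosFrom (c : Nat) : List Int → List Nat
  | [] => []
  | x :: xs => if x ≠ 0 then c :: nzPosFrom (c + 1) xs else nzPosFrom (c + 1) xs

-- ---- enumerate-filter-map equals the position lists ----

lemma enum_filter_z : ∀ (b : List Int) (c : Nat),
    ((PySem.List.enumerate b (c : Int)).filter (fun p => p.2 == 0)).map (·.1)
      = (zPosFrom c b).map (fun (n : Nat) => (n : Int)) := by
  intro b
  induction b with
  | nil => intro c; simp [PySem.List.enumerate_nil, zPosFrom]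
  | cons x xs ih =>
    intro c
    rw [PySem.List.enumerate_cons, List.filter_cons]
    have hcast : ((c : Int) + 1) = ((c + 1 : Nat) : Int) := by push_cast; ring
    by_cases hx : x = 0
    · rw [if_pos (by simp [hx]), hcast]
      simp only [List.map_cons, zPosFrom, if_pos hx]
      rw [ih (c + 1)]
    · rw [if_neg (by simp [hx]), hcast]
      simp only [zPosFrom, if_neg hx]
      rw [ih (c + 1)]

lemma enum_filter_nz : ∀ (b : List Int) (c : Nat),
    ((PySem.List.enumerate b (c : Int)).filter (fun p => p.2 != 0)).map (·.1)
      = (nzPosFrom c b).map (fun (n : Nat) => (n : Int)) := by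
  intro b
  induction b with
  | nil => intro c; simp [PySem.List.enumerate_nil, nzPosFrom]
  | cons x xs ih =>
    intro c
    rw [PySem.List.enumerate_cons, List.filter_cons]
    have hcast : ((c : Int) + 1) = ((c + 1 : Nat) : Int) := by push_cast; ring
    by_cases hx : x = 0
    · rw [if_neg (by simp [hx]), hcast, ih (c + 1)]
      simp [nzPosFrom, hx]
    · rw [if_pos (by simp [hx]), hcast]
      simp only [List.map_cons, nzPosFrom, if_pos hx]
      rw [ih (c + 1)]

lemma zPos_append : ∀ (u v : List Int) (c : Nat),
    zPosFrom c (u ++ v) = zPosFrom c u ++ zPosFrom (c + u.length) v := by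
  intro u
  induction u with
  | nil => intro v c; simp [zPosFrom]
  | cons x xs ih =>
    intro v c
    simp only [List.cons_append, List.length_cons]
    rw [show c + (xs.length + 1) = (c + 1) + xs.length by omega]
    by_cases hx : x = 0
    · simp only [zPosFrom, if_pos hx]
      rw [ih v (c + 1), List.cons_append]
    · simp only [zPosFrom, if_neg hx]
      rw [ih v (c + 1)]

lemma nzPos_append : ∀ (u v : List Int) (c : Nat),
    nzPosFrom c (u ++ v) = nzPosFrom c u ++ nzPosFrom (c + u.length) v := by
  intro u
  induction u with
  | nil => intro v c; simp [nzPosFrom]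
  | cons x xs ih =>
    intro v c
    simp only [List.cons_append, List.length_cons]
    rw [show c + (xs.length + 1) = (c + 1) + xs.length by omega]
    by_cases hx : x = 0
    · simp only [nzPosFrom, if_neg (show ¬ x ≠ 0 by omega)]
      rw [ih v (c + 1)]
    · simp only [nzPosFrom, if_pos hx]
      rw [ih v (c + 1), List.cons_append]

lemma zPos_repZ : ∀ (s c : Nat), zPosFrom c (repZ s) = ascN c s := by
  intro s
  induction s with
  | zero => intro c; rfl
  | succ s ih =>
    intro c
    simp only [repZ, List.replicate_succ]
    show zPosFrom c (0 :: repZ s) = ascN c (s + 1)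
    simp only [zPosFrom, if_pos rfl, ascN]
    simp [ih (c + 1)]

lemma nzPos_repZ : ∀ (s c : Nat), nzPosFrom c (repZ s) = [] := by
  intro s
  induction s with
  | zero => intro c; rfl
  | succ s ih =>
    intro c
    simp only [repZ, List.replicate_succ]
    show nzPosFrom c (0 :: repZ s) = []
    simp only [nzPosFrom, if_neg (show ¬ (0:Int) ≠ 0 by omega)]
    exact ih (c + 1)

lemma zPos_mem : ∀ (u : List Int) (c : Nat) (i : Nat), i ∈ zPosFrom c u →
    c ≤ i ∧ i - c < u.length ∧ u[i - c]? = some 0 := by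
  intro u
  induction u with
  | nil => intro c i h; simp [zPosFrom] at h
  | cons x xs ih =>
    intro c i h
    by_cases hx : x = 0
    · subst hx
      simp only [zPosFrom, if_true, ite_true, List.mem_cons] at h
      rcases h with h | h
      · subst h; simp
      · obtain ⟨h1, h2, h3⟩ := ih (c + 1) i h
        refine ⟨by omega, by simp; omega, ?_⟩
        have : i - c = (i - (c + 1)) + 1 := by omega
        rw [this, List.getElem?_cons_succ]
        exact h3
    · simp only [zPosFrom, if_neg hx] at h
      obtain ⟨h1, h2, h3⟩ := ih (c + 1) i h
      refine ⟨by omega, by simp; omega, ?_⟩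
      have : i - c = (i - (c + 1)) + 1 := by omega
      rw [this, List.getElem?_cons_succ]
      exact h3

lemma zPos_pairwise : ∀ (u : List Int) (c : Nat), List.Pairwise (· < ·) (zPosFrom c u) := by
  intro u
  induction u with
  | nil => intro c; simp [zPosFrom]
  | cons x xs ih =>
    intro c
    by_cases hx : x = 0
    · subst hx
      simp only [zPosFrom, if_true, ite_true]
      refine List.pairwise_cons.mpr ⟨?_, ih (c + 1)⟩
      intro i hi
      have := (zPos_mem xs (c + 1) i hi).1
      omega
    · simp only [zPosFrom, if_neg hx]
      exact ih (c + 1)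

lemma zPos_len : ∀ (u : List Int) (c : Nat),
    (zPosFrom c u).length + (u.filter (fun y => y ≠ 0)).length = u.length := by
  intro u
  induction u with
  | nil => intro c; simp [zPosFrom]
  | cons x xs ih =>
    intro c
    by_cases hx : x = 0
    · subst hx
      simp only [zPosFrom, if_true, ite_true, List.filter_cons]
      rw [if_neg (by simp)]
      have := ih (c + 1)
      simp only [List.length_cons]
      omega
    · simp only [zPosFrom, if_neg hx, List.filter_cons]
      rw [if_pos (by simpa using hx)]
      have := ih (c + 1)
      simp only [List.length_cons]
      omega

-- ---- reversing an ascending run gives a descending run ----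

lemma descN_shift : ∀ (s c : Nat), descN c (s + 1) = descN (c + 1) s ++ [c] := by
  intro s
  induction s with
  | zero => intro c; simp [descN]
  | succ s ih =>
    intro c
    show (c + (s + 1)) :: descN c (s + 1) = descN (c + 1) (s + 1) ++ [c]
    rw [ih c]
    show (c + (s + 1)) :: (descN (c + 1) s ++ [c]) = ((c + 1 + s) :: descN (c + 1) s) ++ [c]
    simp only [List.cons_append]
    congr 1
    omega

lemma ascN_reverse : ∀ (s c : Nat), (ascN c s).reverse = descN c s := by
  intro s
  induction s with
  | zero => intro c; rfl
  | succ s ih =>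
    intro c
    show (c :: ascN (c + 1) s).reverse = descN c (s + 1)
    rw [List.reverse_cons, ih (c + 1), descN_shift]

-- ---- erasing positions, back to front ----

lemma foldl_eraseIdx_append_singleton : ∀ (ys : List Nat) (V : List Int) (z : Int),
    List.Pairwise (· > ·) ys → (∀ j ∈ ys, j < V.length) →
    ys.foldl (fun w i => w.eraseIdx i) (V ++ [z]) = ys.foldl (fun w i => w.eraseIdx i) V ++ [z] := by
  intro ys
  induction ys with
  | nil => intro V z _ _; rfl
  | cons j ys ih =>
    intro V z hpw hlt
    have hj : j < V.length := hlt j (List.mem_cons_self ..)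
    simp only [List.foldl_cons]
    rw [List.eraseIdx_append_of_lt_length hj]
    exact ih (V.eraseIdx j) z hpw.of_cons (by
      intro k hk
      have hkj : j > k := (List.pairwise_cons.mp hpw).1 k hk
      rw [List.length_eraseIdx, if_pos hj]
      omega)

-- ---- the commuting facts for one phase-2 op ----

lemma erase_take_comm (L : List Int) (i m : Nat) (hi : i < m) (hm : m < L.length) :
    (L.eraseIdx i).take m = (L.take (m + 1)).eraseIdx i := by
  rw [List.eraseIdx_eq_take_drop_succ, List.eraseIdx_eq_take_drop_succ,
      List.take_append, List.take_take, List.take_take, List.drop_take, List.length_take]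
  have e1 : min m i = min i (m + 1) := by omega
  have e2 : m - min i L.length = m + 1 - (i + 1) := by omega
  rw [e1, e2]

lemma erase_drop_comm (L : List Int) (i m : Nat) (hi : i < m) :
    (L.eraseIdx i).drop m = L.drop (m + 1) := by
  by_cases hL : i < L.length
  · rw [List.eraseIdx_eq_take_drop_succ, List.drop_append, List.length_take]
    have h1 : List.drop m (List.take i L) = [] :=
      List.drop_eq_nil_of_le (by rw [List.length_take]; omega)
    rw [h1, List.nil_append, List.drop_drop]
    congr 1
    omega
  · have hfix : L.eraseIdx i = L := List.eraseIdx_of_length_le (by omega)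
    rw [hfix, List.drop_eq_nil_of_le (by omega), List.drop_eq_nil_of_le (by omega)]

-- ---- phase 2: the ops at the zero positions left of m ----

lemma ph2 : ∀ (zs : List Nat) (L : List Int) (m : Nat), m < L.length →
    List.Pairwise (· > ·) zs → (∀ i ∈ zs, i < m ∧ L[i]? = some 0) →
    zs.foldl (stepN m) L
      = (zs.foldl (fun w i => w.eraseIdx i) (L.take (m + 1))) ++ repZ zs.length ++ L.drop (m + 1) := by
  intro zs
  induction zs with
  | nil =>
    intro L m _ _ _
    simp [repZ, List.take_append_drop]
  | cons i ys ih =>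
    intro L m hm hpw hall
    obtain ⟨hi, hv⟩ := hall i (List.mem_cons_self ..)
    have hiL : i < L.length := by omega
    have hL0 : L[i] = 0 := by
      have := List.getElem?_eq_getElem hiL
      rw [hv] at this
      exact (Option.some_inj.mp this).symm
    simp only [List.foldl_cons]
    -- compute the op
    have hstep : stepN m L i
        = (L.take (m + 1)).eraseIdx i ++ 0 :: L.drop (m + 1) := by
      unfold stepN
      rw [PySem.List.pop?_natCast L i hiL, hL0]
      show PySem.List.insert (L.eraseIdx i) ((m : Nat) : Int) 0 = _
      rw [PySem.List.insert_natCast _ _ _ (by rw [List.length_eraseIdx, if_pos hiL]; omega)]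
      rw [erase_take_comm L i m hi hm, erase_drop_comm L i m hi]
    rw [hstep]
    set L' : List Int := (L.take (m + 1)).eraseIdx i ++ 0 :: L.drop (m + 1) with hL'
    have hW : (L.take (m + 1)).length = m + 1 := by rw [List.length_take]; omega
    have hWe : ((L.take (m + 1)).eraseIdx i).length = m := by
      rw [List.length_eraseIdx, if_pos (by omega)]
      omega
    have hlen' : L'.length = L.length := by
      rw [hL']
      simp only [List.length_append, List.length_cons, List.length_drop, hWe]
      omega
    have htake' : L'.take (m + 1) = (L.take (m + 1)).eraseIdx i ++ [0] := by
      rw [hL', List.take_append, List.take_of_length_le (by omega), hWe]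
      congr 1
      rw [show m + 1 - m = 1 by omega]
      rfl
    have hdrop' : L'.drop (m + 1) = L.drop (m + 1) := by
      rw [hL', List.drop_append, List.drop_eq_nil_of_le (by omega), hWe,
          show m + 1 - m = 1 by omega]
      simp
    rw [ih L' m (by omega) hpw.of_cons (by
      intro j hj
      have hji : i > j := (List.pairwise_cons.mp hpw).1 j hj
      have hjm : j < m := by omega
      refine ⟨hjm, ?_⟩
      rw [hL', List.getElem?_append_left (by omega)]
      rw [List.getElem?_eraseIdx_of_lt hji, List.getElem?_take_of_lt (by omega)]
      exact (hall j (List.mem_cons_of_mem i hj)).2)]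
    rw [htake', hdrop']
    rw [foldl_eraseIdx_append_singleton ys _ 0 hpw.of_cons (by
      intro j hj
      have hji : i > j := (List.pairwise_cons.mp hpw).1 j hj
      rw [hWe]
      omega)]
    simp only [List.length_cons, List.append_assoc]
    congr 1

-- ---- erasing all zero positions of P, largest first, filters P ----

lemma zPos_single (c : Nat) (y : Int) :
    zPosFrom c [y] = if y = 0 then [c] else [] := by
  by_cases hy : y = 0
  · simp [zPosFrom, hy]
  · simp [zPosFrom, hy]

lemma foldl_erase_zPos : ∀ (P : List Int),
    ((zPosFrom 0 P).reverse).foldl (fun w i => w.eraseIdx i) P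
      = P.filter (fun y => y ≠ 0) := by
  intro P
  induction P using List.reverseRecOn with
  | nil => rfl
  | append_singleton u y ih =>
    rw [zPos_append u [y] 0, zPos_single, List.reverse_append]
    by_cases hy : y = 0
    · rw [if_pos hy, hy]
      simp only [List.reverse_cons, List.reverse_nil, List.nil_append, List.singleton_append,
        List.foldl_cons]
      rw [List.eraseIdx_append_of_length_le (by omega)]
      rw [show 0 + u.length - u.length = 0 by omega]
      simp only [List.eraseIdx_cons_zero, List.append_nil]
      rw [ih, List.filter_append]
      simp
    · rw [if_neg hy]
      simp only [List.reverse_nil, List.nil_append]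
      rw [foldl_eraseIdx_append_singleton _ _ _
            (List.pairwise_reverse.mpr (zPos_pairwise u 0))
            (by
              intro j hj
              rw [List.mem_reverse] at hj
              have := (zPos_mem u 0 j hj).2.1
              omega),
          ih, List.filter_append]
      simp [hy]

-- ---- facts about the last-nonzero decomposition ----

lemma yiLastNZ_none_repZ : ∀ (v : List Int), yiLastNZ v = none → v = repZ v.length := by
  intro v
  induction v with
  | nil => intro _; rfl
  | cons a xs ih =>
    intro h
    simp only [yiLastNZ] at h
    cases h2 : yiLastNZ xs with
    | some kv => rw [h2] at h; simp at h
    | none =>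
      rw [h2] at h
      by_cases ha : a = 0
      · rw [ih h2, ha]
        simp [repZ, List.replicate_succ, List.length_replicate]
      · rw [if_pos ha] at h; simp at h

lemma yiLastNZ_decomp : ∀ (b : List Int) (m : Nat) (x : Int),
    yiLastNZ b = some (m, x) → x ≠ 0 ∧ ∃ (P : List Int) (s : Nat),
      b = P ++ x :: repZ s ∧ P.length = m := by
  intro b
  induction b with
  | nil => intro m x h; simp [yiLastNZ] at h
  | cons a xs ih =>
    intro m x h
    simp only [yiLastNZ] at h
    cases h2 : yiLastNZ xs with
    | some kv =>
      rw [h2] at h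
      obtain ⟨k, v⟩ := kv
      simp only [Option.some_inj] at h
      have hm : m = k + 1 := by
        have := congrArg Prod.fst h
        simpa using this.symm
      have hx : x = v := by
        have := congrArg Prod.snd h
        simpa using this.symm
      subst hm; subst hx
      obtain ⟨hx0, P, s, hb, hP⟩ := ih k x h2
      exact ⟨hx0, a :: P, s, by simp [hb], by simp [hP]⟩
    | none =>
      rw [h2] at h
      by_cases ha : a = 0
      · rw [if_neg (by simp [ha])] at h
        simp at h
      · rw [if_pos ha] at h
        simp only [Option.some_inj] at h
        have hm : m = 0 := by
          have := congrArg Prod.fst h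
          simpa using this.symm
        have hx : x = a := by
          have := congrArg Prod.snd h
          simpa using this.symm
        subst hm; subst hx
        refine ⟨ha, [], xs.length, ?_, rfl⟩
        rw [List.nil_append, ← yiLastNZ_none_repZ xs h2]

-- ---- converting A's fold over Int indices to a fold over Nat indices ----

lemma foldl_yiStep_eq (l : List Int) (m : Nat)
    (hlast : PySem.List.pyGet? l (-1) = some (m : Int)) :
    ∀ (zs : List Nat) (init : List Int),
      (zs.map (fun (n : Nat) => (n : Int))).foldl (yiStep l) init = zs.foldl (stepN m) init := by
  intro zs
  induction zs with
  | nil => intro init; rfl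
  | cons n ns ih =>
    intro init
    simp only [List.map_cons, List.foldl_cons]
    rw [show yiStep l init ((n : Nat) : Int) = stepN m init n from by
      unfold yiStep stepN; rw [hlast]]
    exact ih _

-- ---- the enumerate-based index lists, with Python's default start 0 ----

lemma enum_filter_nz0 (b : List Int) :
    ((PySem.List.enumerate b).filter (fun p => p.2 != 0)).map (·.1)
      = (nzPosFrom 0 b).map (fun (n : Nat) => (n : Int)) := by
  have h := enum_filter_nz b 0
  simpa using h

lemma enum_filter_z0 (b : List Int) :
    ((PySem.List.enumerate b).filter (fun p => p.2 == 0)).map (·.1)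
      = (zPosFrom 0 b).map (fun (n : Nat) => (n : Int)) := by
  have h := enum_filter_z b 0
  simpa using h

-- ---- characterization of A's result on P ++ x :: repZ s (x ≠ 0) ----

lemma yi_char (P : List Int) (x : Int) (s : Nat) (hx0 : x ≠ 0) :
    yi (P ++ x :: repZ s) =
      (if yiF s = 0
       then P.filter (fun y => y ≠ 0)
              ++ x :: repZ ((P.length - (P.filter (fun y => y ≠ 0)).length) + s)
       else P.filter (fun y => y ≠ 0)
              ++ repZ ((P.length - (P.filter (fun y => y ≠ 0)).length) + yiF s)
              ++ x :: repZ (s - yiF s)) := by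
  -- the index lists of A
  have hl : ((PySem.List.enumerate (P ++ x :: repZ s)).filter (fun p => p.2 != 0)).map (·.1)
      = (nzPosFrom 0 P).map (fun (n : Nat) => (n : Int)) ++ [(P.length : Int)] := by
    rw [enum_filter_nz0]
    rw [nzPos_append P (x :: repZ s) 0]
    have h2 : nzPosFrom (0 + P.length) (x :: repZ s) = [P.length] := by
      simp only [Nat.zero_add, nzPosFrom, if_pos hx0]
      rw [nzPos_repZ]
    rw [h2, List.map_append]
    rfl
  have ht : ((PySem.List.enumerate (P ++ x :: repZ s)).filter (fun p => p.2 == 0)).map (·.1)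
      = (zPosFrom 0 P).map (fun (n : Nat) => (n : Int))
        ++ (ascN (P.length + 1) s).map (fun (n : Nat) => (n : Int)) := by
    rw [enum_filter_z0]
    rw [zPos_append P (x :: repZ s) 0]
    have h2 : zPosFrom (0 + P.length) (x :: repZ s) = ascN (P.length + 1) s := by
      simp only [Nat.zero_add, zPosFrom, if_neg hx0]
      rw [zPos_repZ]
    rw [h2, List.map_append]
  have hlast : PySem.List.pyGet?
      ((nzPosFrom 0 P).map (fun (n : Nat) => (n : Int)) ++ [(P.length : Int)]) (-1)
      = some ((P.length : Nat) : Int) :=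
    PySem.List.pyGet?_neg_one_append_singleton _ _
  unfold yi
  rw [hl, ht, if_neg (by simp)]
  rw [List.reverse_append, ← List.map_reverse, ← List.map_reverse, ascN_reverse]
  rw [List.foldl_append]
  rw [foldl_yiStep_eq _ P.length hlast, foldl_yiStep_eq _ P.length hlast]
  -- phase 1
  have hph1 : (descN (P.length + 1) s).foldl (stepN P.length) (P ++ x :: repZ s)
      = P ++ (repZ (phJ s 0 s) ++ x :: repZ (s - phJ s 0 s)) := by
    rw [show P ++ x :: repZ s = P ++ (repZ 0 ++ x :: repZ s) from by simp [repZ]]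
    rw [ph1 P x s 0 s (by omega)]
    rw [show (0 + s - phJ s 0 s) = s - phJ s 0 s by omega]
  rw [hph1]
  set a := phJ s 0 s with hadef
  have ha : a = yiF s := phJ_eq_yiF s s le_rfl
  have hale : a ≤ s := by
    have := phJ_le s 0 s (by omega)
    omega
  -- phase 2
  have hm : P.length < (P ++ (repZ a ++ x :: repZ (s - a))).length := by simp
  have hpw : List.Pairwise (· > ·) ((zPosFrom 0 P).reverse) := by
    rw [List.pairwise_reverse]
    exact zPos_pairwise P 0
  have hall : ∀ i ∈ (zPosFrom 0 P).reverse,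
      i < P.length ∧ (P ++ (repZ a ++ x :: repZ (s - a)))[i]? = some 0 := by
    intro i hi
    rw [List.mem_reverse] at hi
    obtain ⟨_, h2, h3⟩ := zPos_mem P 0 i hi
    rw [Nat.sub_zero] at h2 h3
    exact ⟨h2, by rw [List.getElem?_append_left h2]; exact h3⟩
  rw [ph2 _ _ P.length hm hpw hall]
  -- the window and the tail
  have htake : (P ++ (repZ a ++ x :: repZ (s - a))).take (P.length + 1)
      = P ++ (repZ a ++ x :: repZ (s - a)).take 1 := by
    rw [List.take_append, List.take_of_length_le (by omega)]
    congr 2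
    omega
  have hdrop : (P ++ (repZ a ++ x :: repZ (s - a))).drop (P.length + 1)
      = (repZ a ++ x :: repZ (s - a)).drop 1 := by
    rw [List.drop_append, List.drop_eq_nil_of_le (by omega)]
    rw [List.nil_append]
    congr 1
    omega
  rw [htake, hdrop, List.length_reverse]
  have hbound : ∀ j ∈ (zPosFrom 0 P).reverse, j < P.length := by
    intro j hj
    rw [List.mem_reverse] at hj
    have := (zPos_mem P 0 j hj).2.1
    omega
  have hp : (zPosFrom 0 P).length
      = P.length - (P.filter (fun y => y ≠ 0)).length := by
    have := zPos_len P 0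
    omega
  rw [← ha]
  by_cases ha0 : a = 0
  · rw [if_pos ha0, ha0]
    have hwin : (repZ 0 ++ x :: repZ (s - 0)).take 1 = [x] := by
      simp [repZ]
    have htail : (repZ 0 ++ x :: repZ (s - 0)).drop 1 = repZ s := by
      simp [repZ]
    rw [hwin, htail]
    rw [foldl_eraseIdx_append_singleton _ _ _ hpw hbound]
    rw [foldl_erase_zPos, hp]
    simp only [List.append_assoc, List.singleton_append, repZ]
    rw [List.replicate_add, List.cons_append]
  · rw [if_neg ha0]
    have hrep : repZ a = 0 :: repZ (a - 1) := by
      rw [show a = (a - 1) + 1 by omega]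
      simp [repZ, List.replicate_succ]
    have hwin : (repZ a ++ x :: repZ (s - a)).take 1 = [0] := by
      rw [hrep]
      rfl
    have htail : (repZ a ++ x :: repZ (s - a)).drop 1 = repZ (a - 1) ++ x :: repZ (s - a) := by
      rw [hrep]
      rfl
    rw [hwin, htail]
    rw [foldl_eraseIdx_append_singleton _ _ _ hpw hbound]
    rw [foldl_erase_zPos, hp]
    rw [show P.length - (P.filter (fun y => y ≠ 0)).length + a
          = 1 + (P.length - (P.filter (fun y => y ≠ 0)).length) + (a - 1) by omega]
    simp only [List.append_assoc, List.singleton_append, repZ, List.replicate_add,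
      List.replicate_one]

-- ---- yiF s = 0 iff s + 2 is a power of two ----

lemma yiF_zero_of_pow : ∀ (s : Nat), (∃ k, s + 2 = 2 ^ k) → yiF s = 0 := by
  intro s
  induction s using Nat.strong_induction_on with
  | _ s ih =>
    intro ⟨k, hk⟩
    cases Nat.eq_zero_or_pos s with
    | inl h0 => subst h0; rw [yiF]; rfl
    | inr hpos =>
      -- k ≥ 2, so s + 2 is even, so s is even
      have hk2 : 2 ≤ k := by
        by_contra hlt
        interval_cases k <;> omega
      have heven : s % 2 = 0 := by
        have : 2 ^ (k - 2) * 4 = 2 ^ k := by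
          rw [show (4 : Nat) = 2 ^ 2 from rfl, ← pow_add, Nat.sub_add_cancel hk2]
        omega
      rw [yiF, if_neg (by omega), if_neg (by omega)]
      apply ih (s / 2 - 1) (by omega)
      refine ⟨k - 1, ?_⟩
      have : 2 ^ (k - 1) * 2 = 2 ^ k := by
        rw [← pow_succ, Nat.sub_add_cancel (by omega : 1 ≤ k)]
      omega

lemma pow_of_yiF_zero : ∀ (s : Nat), yiF s = 0 → ∃ k, s + 2 = 2 ^ k := by
  intro s
  induction s using Nat.strong_induction_on with
  | _ s ih =>
    intro h
    cases Nat.eq_zero_or_pos s with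
    | inl h0 => subst h0; exact ⟨1, rfl⟩
    | inr hpos =>
      by_cases hodd : s % 2 = 1
      · rw [yiF, if_neg (by omega), if_pos hodd] at h
        omega
      · rw [yiF, if_neg (by omega), if_neg hodd] at h
        obtain ⟨k, hk⟩ := ih (s / 2 - 1) (by omega) h
        refine ⟨k + 1, ?_⟩
        rw [pow_add]
        omega

-- ---- index facts on the decomposed list ----

lemma decomp_len (P : List Int) (x : Int) (s : Nat) :
    (P ++ x :: repZ s).length = P.length + 1 + s := by
  simp [repZ]; omega

lemma decomp_getElem_last (P : List Int) (x : Int) (s : Nat) :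
    (P ++ x :: repZ s)[P.length]? = some x := by
  rw [List.getElem?_append_right (le_refl P.length), Nat.sub_self]
  rfl

lemma decomp_getElem_tail (P : List Int) (x : Int) (s : Nat) :
    ∀ j, P.length < j → j < (P ++ x :: repZ s).length → (P ++ x :: repZ s)[j]? = some 0 := by
  intro j hj hjlen
  rw [List.getElem?_append_right (by omega)]
  rw [show j - P.length = (j - P.length - 1) + 1 by omega, List.getElem?_cons_succ]
  rw [repZ, List.getElem?_replicate, if_pos (by rw [decomp_len] at hjlen; omega)]

-- ---- filter facts ----

lemma filter_repZ (n : Nat) : (repZ n).filter (fun y => y ≠ 0) = [] := by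
  induction n with
  | zero => rfl
  | succ n ih =>
    simp only [repZ, List.replicate_succ, List.filter_cons]
    rw [if_neg (by simp)]
    exact ih

lemma filter_decomp (P : List Int) (x : Int) (s : Nat) (hx : x ≠ 0) :
    (P ++ x :: repZ s).filter (fun y => y ≠ 0) = P.filter (fun y => y ≠ 0) ++ [x] := by
  rw [List.filter_append, List.filter_cons, if_pos (by simpa using hx), filter_repZ]

lemma filter_len_le (P : List Int) : (P.filter (fun y => y ≠ 0)).length ≤ P.length :=
  List.length_filter_le _ _

-- yi_alt on the decomposed list
lemma yi_alt_decomp (P : List Int) (x : Int) (s : Nat) (hx : x ≠ 0) :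
    yi_alt (P ++ x :: repZ s)
      = P.filter (fun y => y ≠ 0)
          ++ x :: repZ ((P.length - (P.filter (fun y => y ≠ 0)).length) + s) := by
  unfold yi_alt
  rw [filter_decomp P x s hx]
  show (P.filter (fun y => y ≠ 0) ++ [x])
      ++ List.replicate ((P ++ x :: repZ s).length - (P.filter (fun y => y ≠ 0) ++ [x]).length) 0
      = _
  have hlen : (P ++ x :: repZ s).length = P.length + 1 + s := by simp [repZ]; omega
  have hnz : (P.filter (fun y => y ≠ 0) ++ [x]).length
      = (P.filter (fun y => y ≠ 0)).length + 1 := by simp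
  rw [hlen, hnz]
  have hle := filter_len_le P
  rw [show P.length + 1 + s - ((P.filter (fun y => y ≠ 0)).length + 1)
        = (P.length - (P.filter (fun y => y ≠ 0)).length) + s by omega]
  simp [repZ]

-- B on an all-zero list
lemma yi_alt_repZ (n : Nat) : yi_alt (repZ n) = repZ n := by
  unfold yi_alt
  rw [filter_repZ]
  simp [repZ]

-- A on an all-zero list: l = [] so A returns b unchanged
lemma yi_repZ (n : Nat) : yi (repZ n) = repZ n := by
  unfold yi
  rw [if_pos]
  rw [enum_filter_nz0, nzPos_repZ]
  rfl

theorem yi_spec : Claim_unchanged_yi := by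
  intro b _ hnD
  show yi b = yi_alt b
  cases h : yiLastNZ b with
  | none =>
    have hb := yiLastNZ_none_repZ b h
    rw [hb, yi_repZ, yi_alt_repZ]
  | some mx =>
    obtain ⟨m, x⟩ := mx
    obtain ⟨hx0, P, s, hb, hP⟩ := yiLastNZ_decomp b m x h
    subst hb
    have hlen := decomp_len P x s
    have hF : yiF s = 0 := by
      by_cases hs : s = 0
      · subst hs; rw [yiF]; rfl
      · -- ¬D, while the shape conjuncts hold at m = P.length, so the power clause fails
        have hex : ∃ k, s + 2 = 2 ^ k := by
          by_contra hnex
          refine hnD ⟨P.length, by omega, ?_, ?_, by omega, ?_⟩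
          · rw [decomp_getElem_last]
            simp [hx0]
          · intro j hjlen hmj
            exact decomp_getElem_tail P x s j hmj hjlen
          · intro k _ hk
            rw [show (P ++ x :: repZ s).length - 1 - P.length = s by omega] at hk
            exact hnex ⟨k, hk⟩
        exact yiF_zero_of_pow s hex
    rw [yi_char P x s hx0, if_pos hF, yi_alt_decomp P x s hx0]

theorem yi_changed : Claim_changed_yi := by
  unfold Claim_changed_yi
  refine ⟨by decide, ?_, by decide, by decide, by decide⟩
  unfold D_yi
  decide

theorem yi_tight : Claim_exact_yi := by
  intro b _ hD heq
  cases h : yiLastNZ b with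
  | none =>
    obtain ⟨m, hm, hm0, _, _, _⟩ := hD
    rw [yiLastNZ_none_repZ b h] at hm0
    refine hm0 ?_
    rw [yiLastNZ_none_repZ b h] at hm
    rw [repZ, List.getElem?_replicate, if_pos (by simpa [repZ] using hm)]
  | some mx =>
    obtain ⟨m', x⟩ := mx
    obtain ⟨hx0, P, s, hb, hP⟩ := yiLastNZ_decomp b m' x h
    subst hb
    obtain ⟨m, hm, hm0, hafter, hs1, hpow⟩ := hD
    have hlen := decomp_len P x s
    -- the m of D_yi is exactly P.length
    have hmP : m = P.length := by
      rcases Nat.lt_trichotomy m P.length with hlt | heqm | hgt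
      · exfalso
        have := hafter P.length (by omega) hlt
        rw [decomp_getElem_last] at this
        exact hx0 (Option.some_inj.mp this)
      · exact heqm
      · exact absurd (decomp_getElem_tail P x s m hgt hm) hm0
    subst hmP
    rw [show (P ++ x :: repZ s).length - 1 - P.length = s by omega] at hs1 hpow
    have hF : yiF s ≠ 0 := by
      intro h0
      obtain ⟨k, hk⟩ := pow_of_yiF_zero s h0
      have hkle : k ≤ (P ++ x :: repZ s).length + 1 := by
        have := Nat.lt_two_pow_self (n := k)
        omega
      exact hpow k hkle hk
    rw [yi_char P x s hx0, if_neg hF, yi_alt_decomp P x s hx0] at heq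
    -- compare the element at index (P.filter …).length
    set F := P.filter (fun y => y ≠ 0) with hFdef
    have hcmp := congrArg (fun w => w[F.length]?) heq
    simp only [List.append_assoc] at hcmp
    rw [List.getElem?_append_right (le_refl F.length), Nat.sub_self] at hcmp
    rw [List.getElem?_append_right (le_refl F.length), Nat.sub_self] at hcmp
    have hl : (repZ (P.length - F.length + yiF s) ++ x :: repZ (s - yiF s))[0]? = some 0 := by
      have hrep : repZ (P.length - F.length + yiF s)
          = 0 :: repZ (P.length - F.length + yiF s - 1) := by
        rw [show P.length - F.length + yiF s = (P.length - F.length + yiF s - 1) + 1 by omega]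
        simp [repZ, List.replicate_succ]
      rw [hrep]
      rfl
    rw [hl] at hcmp
    simp only [List.getElem?_cons_zero, Option.some_inj] at hcmp
    exact hx0 hcmp.symm
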